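-- pv_equiv track=rewrite | github.com/sun-hainan/Python | 缓存无关算法/external_memory.py | external_merge_sort
-- ===== SOURCE A (Python) =====
-- from typing import List, Tuple
--
-- def external_merge_sort(n: int, M: int) -> Tuple[int, List[List[int]]]:
--     """
--     外存归并排序的I/O复杂度分析
--
--     Args:
--         n: 元素总数
--         M: 内存大小(能容纳的元素数)
--
--     Returns:
--         (I/O次数, 生成的runs列表)
--     """
--     # 每个runs的大小为M
--     num_runs = (n + M - 1) // M
--     runs = [list(range(i * M, min((i + 1) * M, n))) for i in range(num_runs)]
--
--     # 排序每个run
--     for run in runs: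
--         run.sort()
--
--     # 归并runs
--     # 每趟归并处理2*M个元素
--     ios = 0
--     while len(runs) > 1:
--         new_runs = []
--
--         for i in range(0, len(runs), 2):
--             if i + 1 < len(runs):
--                 # 归并两个runs
--                 merged = merge_two_runs(runs[i], runs[i + 1])
--                 new_runs.append(merged)
--                 ios += 2  # 读两个runs,写一个新run
--             else:
--                 new_runs.append(runs[i])
--                 ios += 1  # 写最后一个run
--
--         runs = new_runs
--
--     return ios, runs
--
-- def merge_two_runs(a: List[int], b: List[int]) -> List[int]:
--     """归并两个有序数组"""
--     result = []
--     i = j = 0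
--
--     while i < len(a) and j < len(b):
--         if a[i] < b[j]:
--             result.append(a[i])
--             i += 1
--         else:
--             result.append(b[j])
--             j += 1
--
--     result.extend(a[i:])
--     result.extend(b[j:])
--     return result
-- ===== SOURCE B (Python) =====
-- def external_merge_sort(n, M):
--     # Arithmetic pass simulation: each merge pass over k runs costs exactly k I/Os
--     # and leaves ceil(k/2) runs; the final single run is just 0..n-1.
--     num_runs = (n + M - 1) // M
--     ios = 0
--     k = num_runs
--     while k > 1:
--         ios += k
--         k = (k + 1) // 2
--     return ios, ([list(range(n))] if num_runs >= 1 else [])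
-- ===== Notes on version B (the rewrite author's own statement) =====
-- stated objective: simpler
-- what changed: Instead of materializing all runs and repeatedly merging them element by element, B counts I/Os arithmetically (each pass over k runs costs exactly k I/Os, leaving ceil(k/2) runs) and emits the known final run list(range(n)) directly.
-- outside the precondition, e.g. on external_merge_sort(1, -2): A returns (0, [[]]), B returns (0, [[0]])
import Mathlib
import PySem

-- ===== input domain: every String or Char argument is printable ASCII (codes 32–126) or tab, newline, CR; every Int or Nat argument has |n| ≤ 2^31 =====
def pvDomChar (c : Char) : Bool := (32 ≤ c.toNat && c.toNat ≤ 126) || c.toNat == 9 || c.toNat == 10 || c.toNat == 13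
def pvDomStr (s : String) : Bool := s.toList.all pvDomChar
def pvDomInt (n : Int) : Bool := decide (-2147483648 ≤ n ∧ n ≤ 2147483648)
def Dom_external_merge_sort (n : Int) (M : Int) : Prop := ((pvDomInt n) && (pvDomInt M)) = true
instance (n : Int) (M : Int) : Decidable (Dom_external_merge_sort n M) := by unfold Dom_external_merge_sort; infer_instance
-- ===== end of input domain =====

-- B replaces the physical merge simulation by arithmetic pass counting (each pass over k runs
-- costs exactly k I/Os and leaves ceil(k/2) runs) and emits the final run range(n) directly.


-- ===== PORT A =====

-- merge_two_runs: the two-pointer while loop as the obvious structural recursion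
def mergeTwoRuns : List Int → List Int → List Int
  | [], b => b
  | x :: xs, [] => x :: xs
  | x :: xs, y :: ys =>
      if x < y then x :: mergeTwoRuns xs (y :: ys)
      else y :: mergeTwoRuns (x :: xs) ys

-- the inner 'for i in range(0, len(runs), 2)' pass: new runs and the ios added this pass
def mergePass : List (List Int) → List (List Int) × Int
  | [] => ([], 0)
  | [r] => ([r], 1)
  | a :: b :: rest =>
      let p := mergePass rest
      (mergeTwoRuns a b :: p.1, p.2 + 2)

theorem mergePass_length (rs : List (List Int)) :
    (mergePass rs).1.length = (rs.length + 1) / 2 := by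
  induction rs using mergePass.induct with
  | case1 => simp [mergePass]
  | case2 r => simp [mergePass]
  | case3 a b rest ih => simp [mergePass, ih]; omega

theorem mergePass_length_lt (rs : List (List Int)) (h : 1 < rs.length) :
    (mergePass rs).1.length < rs.length := by
  rw [mergePass_length]; omega

-- the outer 'while len(runs) > 1' loop
def mergeLoop (runs : List (List Int)) (ios : Int) : Int × List (List Int) :=
  if h1 : 1 < runs.length then
    mergeLoop (mergePass runs).1 (ios + (mergePass runs).2)
  else (ios, runs)
termination_by runs.length
decreasing_by exact mergePass_length_lt runs h1

def external_merge_sort (n : Int) (M : Int) : Int × List (List Int) :=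
  let num_runs := PySem.Int.floordiv (n + M - 1) M
  let runs := (PySem.List.pyRange 0 num_runs 1).map
      (fun i => PySem.List.pyRange (i * M) (min ((i + 1) * M) n) 1)
  let runs := runs.map (fun run => PySem.List.sorted run (fun x => x) false)
  mergeLoop runs 0

-- ===== PORT B =====

def iosLoop (k : Int) (ios : Int) : Int :=
  if hk : 1 < k then iosLoop (PySem.Int.floordiv (k + 1) 2) (ios + k) else ios
termination_by k.toNat
decreasing_by
  rw [PySem.Int.floordiv_eq_ediv_of_pos (by omega)]
  omega

def external_merge_sort_alt (n : Int) (M : Int) : Int × List (List Int) :=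
  let num_runs := PySem.Int.floordiv (n + M - 1) M
  let ios := iosLoop num_runs 0
  (ios, if 1 ≤ num_runs then [PySem.List.pyRange 0 n 1] else [])

-- ===== PRECONDITION & SPEC =====
-- Pre_ restricts to the natural domain of a positive memory size: at M = 0 the Python A raises
-- ZeroDivisionError, and for M < 0 the run boundaries of A are meaningless artifacts of floor
-- division that B does not reproduce.
def Pre_external_merge_sort (n : Int) (M : Int) : Prop := 1 ≤ M
instance (n : Int) (M : Int) : Decidable (Pre_external_merge_sort n M) := by
  unfold Pre_external_merge_sort; infer_instance

def pvWitness_external_merge_sort : Int × Int := (10, 3)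

def Spec_external_merge_sort (n : Int) (M : Int) (out : Int × List (List Int)) : Prop :=
  out = external_merge_sort_alt n M
instance (n : Int) (M : Int) (out : Int × List (List Int)) :
    Decidable (Spec_external_merge_sort n M out) := by
  unfold Spec_external_merge_sort; infer_instance

-- ===== CLAIM (what is proved, stated in full; the proofs are below) =====
def Claim_equal_external_merge_sort : Prop :=
  ∀ (n : Int) (M : Int), Dom_external_merge_sort n M → Pre_external_merge_sort n M →
    Spec_external_merge_sort n M (external_merge_sort n M)

-- ===== LEMMAS AND PROOFS =====

-- 'runs' always consists of consecutive half-open integer ranges covering [a, c)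
inductive Cover : Int → Int → List (List Int) → Prop
  | nil (a : Int) : Cover a a []
  | cons {a b c : Int} {rs : List (List Int)} (hab : a < b) (h : Cover b c rs) :
      Cover a c (PySem.List.pyRange a b 1 :: rs)

theorem mergeTwoRuns_append (a b : List Int) (h : ∀ x ∈ a, ∀ y ∈ b, x < y) :
    mergeTwoRuns a b = a ++ b := by
  induction a with
  | nil => cases b <;> simp [mergeTwoRuns]
  | cons x xs ih =>
    cases b with
    | nil => simp [mergeTwoRuns]
    | cons y ys =>
      have hxy : x < y := h x (by simp) y (by simp)
      simp only [mergeTwoRuns, if_pos hxy, List.cons_append]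
      rw [ih (fun u hu v hv => h u (by simp [hu]) v hv)]

theorem mergePass_cover {a c : Int} {rs : List (List Int)} (h : Cover a c rs) :
    Cover a c (mergePass rs).1 := by
  induction rs using mergePass.induct generalizing a with
  | case1 => cases h; simpa [mergePass] using Cover.nil _
  | case2 r => simpa [mergePass] using h
  | case3 r1 r2 rest ih =>
    cases h with
    | cons hab h2 =>
      rename_i b
      cases h2 with
      | cons hbc h3 =>
        rename_i b2
        simp only [mergePass]
        have hmerge : mergeTwoRuns (PySem.List.pyRange a b 1) (PySem.List.pyRange b b2 1)
            = PySem.List.pyRange a b2 1 := by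
          rw [mergeTwoRuns_append]
          · exact (PySem.List.pyRange_one_append a b b2 (le_of_lt hab) (le_of_lt hbc)).symm
          · intro x hx y hy
            rw [PySem.List.mem_pyRange_one] at hx hy
            omega
        rw [hmerge]
        exact Cover.cons (lt_trans hab hbc) (ih h3)

theorem mergePass_count (rs : List (List Int)) :
    (mergePass rs).2 = (rs.length : Int) := by
  induction rs using mergePass.induct with
  | case1 => simp [mergePass]
  | case2 r => simp [mergePass]
  | case3 a b rest ih => simp [mergePass, ih]; ring

theorem cover_sorted {a c : Int} {rs : List (List Int)} (h : Cover a c rs) :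
    rs.map (fun run => PySem.List.sorted run (fun x => x) false) = rs := by
  induction h with
  | nil => simp
  | cons hab h ih =>
    simp only [List.map_cons, ih, List.cons.injEq, and_true]
    exact PySem.List.sorted_eq_self_of_pairwise _ _
      ((PySem.List.pairwise_lt_pyRange_one _ _).imp le_of_lt)

theorem cover_chunks (M n q : Int) (hM : 1 ≤ M) (h1 : (q - 1) * M < n) (h2 : n ≤ q * M) :
    ∀ (j : Nat) (i : Int), 0 ≤ i → i + j = q → j ≠ 0 →
      Cover (i * M) n ((PySem.List.pyRange i q 1).map
        (fun i => PySem.List.pyRange (i * M) (min ((i + 1) * M) n) 1)) := by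
  intro j
  induction j with
  | zero => intro i _ _ hj; exact absurd rfl hj
  | succ j' ih =>
    intro i hi hiq _
    have hlt : i < q := by omega
    rw [PySem.List.pyRange_one_cons hlt, List.map_cons]
    by_cases hj' : j' = 0
    · -- last chunk: i + 1 = q, so min ((i+1)*M) n = n
      have hq : i + 1 = q := by omega
      have hmin : min ((i + 1) * M) n = n := by
        rw [min_eq_right]; rw [hq]; exact h2
      have hlast : i * M < n := by
        have : (q - 1) * M = i * M := by rw [← hq]; ring
        omega
      rw [hmin, PySem.List.pyRange_one_eq_nil (by omega : q ≤ i + 1), List.map_nil]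
      exact Cover.cons hlast (Cover.nil n)
    · -- middle chunk: (i+1)*M ≤ (q-1)*M < n
      have hle : (i + 1) * M ≤ (q - 1) * M :=
        mul_le_mul_of_nonneg_right (by omega) (by omega)
      have hmin : min ((i + 1) * M) n = (i + 1) * M := by
        rw [min_eq_left]; omega
      rw [hmin]
      have hstep : i * M < (i + 1) * M := by nlinarith
      exact Cover.cons hstep (ih (i + 1) (by omega) (by omega) hj')

theorem mergeLoop_cover : ∀ (rs : List (List Int)) (ios : Int) {a c : Int},
    Cover a c rs → rs ≠ [] →
    mergeLoop rs ios = (iosLoop (rs.length : Int) ios, [PySem.List.pyRange a c 1]) := by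
  intro rs ios
  induction rs, ios using mergeLoop.induct with
  | case1 rs ios h ih =>
    intro a c hcov hne
    rw [mergeLoop]
    simp only [dif_pos h]
    have hcov' := mergePass_cover hcov
    have hlen := mergePass_length rs
    have hne' : (mergePass rs).1 ≠ [] := by
      intro hnil
      rw [hnil] at hlen
      simp at hlen; omega
    rw [ih hcov' hne', mergePass_count]
    have hstep : iosLoop (rs.length : Int) ios
        = iosLoop (PySem.Int.floordiv ((rs.length : Int) + 1) 2) (ios + (rs.length : Int)) := by
      rw [iosLoop, dif_pos (by exact_mod_cast h : (1:Int) < (rs.length : Int))]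
    rw [hstep]
    have hdiv : PySem.Int.floordiv ((rs.length : Int) + 1) 2 = ((mergePass rs).1.length : Int) := by
      rw [hlen]; exact_mod_cast PySem.Int.floordiv_natCast (rs.length + 1) 2
    rw [hdiv]
  | case2 rs ios h =>
    intro a c hcov hne
    rw [mergeLoop]
    simp only [dif_neg h]
    have hlen1 : rs.length = 1 := by
      cases rs with
      | nil => exact absurd rfl hne
      | cons r t => simp at h ⊢; omega
    cases hcov with
    | nil => simp at hlen1
    | cons hab h2 =>
      rename_i b rs'
      have : rs' = [] := by simpa using hlen1
      subst this
      cases h2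
      rw [hlen1, iosLoop]
      norm_num

-- bounds of num_runs = ceil(n / M) for M ≥ 1
theorem num_runs_bounds (n M : Int) (hM : 1 ≤ M) :
    (PySem.Int.floordiv (n + M - 1) M - 1) * M < n ∧
    n ≤ PySem.Int.floordiv (n + M - 1) M * M ∧
    (1 ≤ n → 1 ≤ PySem.Int.floordiv (n + M - 1) M) ∧
    (n ≤ 0 → PySem.Int.floordiv (n + M - 1) M ≤ 0) := by
  have hlo : PySem.Int.floordiv (n + M - 1) M * M ≤ n + M - 1 :=
    (PySem.Int.le_floordiv_iff_mul_le (by omega)).mp le_rfl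
  have hhi : n + M - 1 < (PySem.Int.floordiv (n + M - 1) M + 1) * M :=
    (PySem.Int.floordiv_lt_iff_lt_mul (by omega)).mp (by omega)
  set q := PySem.Int.floordiv (n + M - 1) M with hq
  refine ⟨by nlinarith, by nlinarith, fun hn => ?_, fun hn => ?_⟩
  · by_contra hc
    rw [not_le] at hc
    nlinarith
  · by_contra hc
    rw [not_le] at hc
    nlinarith

-- ===== VERDICT (by name: the statement is the Claim_ definition above) =====
theorem external_merge_sort_spec : Claim_equal_external_merge_sort := by
  intro n M _ hPre
  unfold Spec_external_merge_sort
  unfold external_merge_sort external_merge_sort_alt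
  simp only []
  set q := PySem.Int.floordiv (n + M - 1) M with hq
  obtain ⟨hb1, hb2, hpos, hneg⟩ := num_runs_bounds n M hPre
  by_cases hn : 1 ≤ n
  · -- at least one run
    have hq1 : 1 ≤ q := hpos hn
    have hcov : Cover 0 n ((PySem.List.pyRange 0 q 1).map
        (fun i => PySem.List.pyRange (i * M) (min ((i + 1) * M) n) 1)) := by
      have := cover_chunks M n q hPre hb1 hb2 q.toNat 0 le_rfl (by omega) (by omega)
      simpa using this
    rw [cover_sorted hcov]
    have hne : (PySem.List.pyRange 0 q 1).map
        (fun i => PySem.List.pyRange (i * M) (min ((i + 1) * M) n) 1) ≠ [] := by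
      simp [PySem.List.pyRange_one_cons (by omega : (0:Int) < q)]
    rw [mergeLoop_cover _ 0 hcov hne]
    have hlen : (((PySem.List.pyRange 0 q 1).map
        (fun i => PySem.List.pyRange (i * M) (min ((i + 1) * M) n) 1)).length : Int) = q := by
      simp [PySem.List.length_pyRange_one]
      omega
    rw [hlen, if_pos hq1]
  · -- n ≤ 0: no runs at all
    have hq0 : q ≤ 0 := hneg (by omega)
    rw [PySem.List.pyRange_one_eq_nil hq0]
    simp only [List.map_nil]
    rw [mergeLoop, iosLoop]
    simp
    omega
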